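-- pv_equiv track=rewrite | github.com/stilab-ets/iacrec | Study_scripts/GA-HIST/GA-HIST.py | compute_High
-- ===== SOURCE A (Python) =====
-- def compute_High(lst):
--     # Transpose the list of lists
--     transposed = list(zip(*lst))
--
--     # Find the highest value for each column
--     highest_values = []
--     highest_indices = []
--     for column in transposed:
--         max_value = max(column)
--         highest_values.append(max_value)
--         highest_index = column.index(max_value)
--         highest_indices.append(highest_index)
--
--     return highest_indices, highest_values
-- ===== SOURCE B (Python) =====
-- def compute_High(lst):
--     if not lst:
--         return [], []
--     n = min(len(row) for row in lst)
--     # per-column accumulator: (current max value, row index of its first occurrence)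
--     best = [(v, 0) for v in lst[0][:n]]
--     for i, row in enumerate(lst[1:], 1):
--         best = [(row[j], i) if v < row[j] else (v, k) for j, (v, k) in enumerate(best)]
--     return [k for _, k in best], [v for v, _ in best]
-- ===== Notes on version B (the rewrite author's own statement) =====
-- stated objective: alternative
-- what changed: Single row-major pass maintaining per-column (max, first-index) accumulators instead of transposing the matrix and scanning each column twice (max then index).
import Mathlib
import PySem

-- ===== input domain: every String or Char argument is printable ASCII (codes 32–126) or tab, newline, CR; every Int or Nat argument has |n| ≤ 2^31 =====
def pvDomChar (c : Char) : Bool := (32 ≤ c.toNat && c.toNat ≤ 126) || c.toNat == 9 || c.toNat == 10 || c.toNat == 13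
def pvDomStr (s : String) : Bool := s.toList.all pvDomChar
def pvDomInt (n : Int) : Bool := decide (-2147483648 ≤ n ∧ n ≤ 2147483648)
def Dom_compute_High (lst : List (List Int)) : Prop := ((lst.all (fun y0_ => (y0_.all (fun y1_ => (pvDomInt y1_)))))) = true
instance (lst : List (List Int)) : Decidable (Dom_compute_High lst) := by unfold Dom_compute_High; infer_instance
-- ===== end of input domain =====

-- B replaces A's transpose-then-scan-each-column-twice by a single row-major pass
-- keeping per-column (max, first-index) accumulators (alternative decomposition, same cost).


-- ===== PORT A =====
-- exact port of the builtin `list(zip(*lst))`: the result has min-row-length tuples,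
-- the j-th tuple collecting the j-th element of every row (getD is always in range here).
def pyZipStar (rows : List (List Int)) : List (List Int) :=
  match rows with
  | [] => []
  | r :: rs =>
      (List.range (rs.foldl (fun m l => min m l.length) r.length)).map
        (fun j => (r :: rs).map (fun row => row.getD j 0))

-- one iteration of A's loop body: max(column), append, column.index(max), append
def colStep (acc : List Int × List Int) (column : List Int) : List Int × List Int :=
  match PySem.List.max? column (fun y => y) with
  | none => acc  -- unreachable: every tuple produced by zip(*lst) is nonempty
  | some m => (acc.1 ++ [(((PySem.List.index? column m).getD 0 : Nat) : Int)], acc.2 ++ [m])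

def compute_High (lst : List (List Int)) : List Int × List Int :=
  (pyZipStar lst).foldl colStep ([], [])

-- ===== PORT B =====
-- one entry of B's list comprehension: p = (i, row), q = (j, (v, k))
def bUpdate (p : Int × List Int) (q : Int × (Int × Int)) : Int × Int :=
  let x := p.2.getD q.1.toNat 0
  if q.2.1 < x then (x, p.1) else q.2

def compute_High_alt (lst : List (List Int)) : List Int × List Int :=
  match lst with
  | [] => ([], [])
  | r0 :: rest =>
      let n := rest.foldl (fun m l => min m l.length) r0.length
      let best0 := (r0.take n).map (fun v => (v, (0 : Int)))
      let best := (PySem.List.enumerate rest 1).foldl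
        (fun best p => (PySem.List.enumerate best 0).map (fun q => bUpdate p q)) best0
      (best.map (fun q => q.2), best.map (fun q => q.1))

-- ===== PRECONDITION & SPEC =====
def Spec_compute_High (lst : List (List Int)) (out : List Int × List Int) : Prop := out = compute_High_alt lst
instance (lst : List (List Int)) (out : List Int × List Int) : Decidable (Spec_compute_High lst out) := by unfold Spec_compute_High; infer_instance

-- ===== CLAIM (what is proved, stated in full; the proofs are below) =====
def Claim_equal_compute_High : Prop := ∀ (lst : List (List Int)), Dom_compute_High lst → Spec_compute_High lst (compute_High lst)

-- ===== LEMMAS AND PROOFS =====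
-- max of a nonempty list, as A's running-max loop computes it
def maxOf : List Int → Int
  | [] => 0
  | a :: t => t.foldl max a

-- first index of the max (as Nat); the getD is never taken on nonempty lists
def ixOf (c : List Int) : Nat := (PySem.List.index? c (maxOf c)).getD 0

theorem foldl_max_mem (t : List Int) : ∀ (a : Int), t.foldl max a = a ∨ t.foldl max a ∈ t := by
  induction t with
  | nil => intro a; left; rfl
  | cons b t ih =>
      intro a
      simp only [List.foldl_cons]
      rcases ih (max a b) with h | h
      · rw [h]; rcases max_choice a b with hm | hm <;> simp [hm]
      · simp [h]

theorem maxOf_mem (s : List Int) (h : s ≠ []) : maxOf s ∈ s := by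
  match s with
  | a :: t =>
      rcases foldl_max_mem t a with h' | h' <;> simp [maxOf, h']

theorem le_maxOf (s : List Int) (a : Int) (ha : a ∈ s) : a ≤ maxOf s := by
  match s with
  | b :: t =>
      rcases PySem.List.le_foldl_max t b with ⟨h1, h2⟩
      rcases List.mem_cons.mp ha with rfl | h
      · exact h1
      · exact h2 a h

theorem maxOf_append_singleton (s : List Int) (y : Int) (h : s ≠ []) :
    maxOf (s ++ [y]) = max (maxOf s) y := by
  match s with
  | a :: t => simp [maxOf, List.foldl_append]

-- A's loop over the columns appends one index and one value per column
theorem foldA (cols : List (List Int)) (acc : List Int × List Int)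
    (h : ∀ c ∈ cols, c ≠ []) :
    cols.foldl colStep acc
      = (acc.1 ++ cols.map (fun c => ((ixOf c : Nat) : Int)), acc.2 ++ cols.map maxOf) := by
  induction cols generalizing acc with
  | nil => simp
  | cons c cols ih =>
      match c, h c (by simp) with
      | a :: t, _ =>
          have hstep : colStep acc (a :: t)
              = (acc.1 ++ [((ixOf (a :: t) : Nat) : Int)], acc.2 ++ [maxOf (a :: t)]) := by
            simp [colStep, PySem.List.max?_id_cons, ixOf, maxOf]
          rw [List.foldl_cons, hstep, ih _ (fun c hc => h c (by simp [hc]))]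
          simp

-- enumerate of a (range n).map g
theorem enumerate_range_map (n : Nat) (g : Nat → Int × Int) :
    PySem.List.enumerate ((List.range n).map g) 0
      = (List.range n).map (fun (j : Nat) => ((j : Int), g j)) := by
  induction n with
  | zero => simp [PySem.List.enumerate]
  | succ n ih =>
      rw [List.range_succ, List.map_append, PySem.List.enumerate_append, ih, List.map_append]
      simp [PySem.List.enumerate_cons, PySem.List.enumerate]

-- B's outer fold acts pointwise on the columns
theorem foldB_pointwise (rows : List (Int × List Int)) (n : Nat) (g : Nat → Int × Int) :
    rows.foldl (fun best p => (PySem.List.enumerate best 0).map (fun q => bUpdate p q))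
        ((List.range n).map g)
      = (List.range n).map (fun (j : Nat) => rows.foldl (fun b p => bUpdate p ((j : Int), b)) (g j)) := by
  induction rows generalizing g with
  | nil => simp
  | cons p rows ih =>
      rw [List.foldl_cons, enumerate_range_map, List.map_map]
      have := ih (fun j => bUpdate p ((j : Int), g j))
      simpa using this

-- per-column invariant of B's scan: accumulator = (max so far, first index of that max)
theorem scan_inv (j : Nat) : ∀ (rest : List (List Int)) (s : List Int), s ≠ [] →
    (PySem.List.enumerate rest (s.length : Int)).foldl
        (fun b p => bUpdate p ((j : Int), b)) (maxOf s, ((ixOf s : Nat) : Int))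
      = (maxOf (s ++ rest.map (fun r => r.getD j 0)),
         ((ixOf (s ++ rest.map (fun r => r.getD j 0)) : Nat) : Int)) := by
  intro rest
  induction rest with
  | nil => intro s hs; simp [PySem.List.enumerate]
  | cons r rest ih =>
      intro s hs
      rw [PySem.List.enumerate_cons, List.foldl_cons]
      have hstep : bUpdate ((s.length : Int), r) ((j : Int), (maxOf s, ((ixOf s : Nat) : Int)))
          = (maxOf (s ++ [r.getD j 0]), ((ixOf (s ++ [r.getD j 0]) : Nat) : Int)) := by
        by_cases hlt : maxOf s < r.getD j 0
        · have hnotin : r.getD j 0 ∉ s := fun hmem => absurd (le_maxOf s _ hmem) (not_le.mpr hlt)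
          have hmax : maxOf (s ++ [r.getD j 0]) = r.getD j 0 := by
            rw [maxOf_append_singleton _ _ hs]; exact max_eq_right (le_of_lt hlt)
          have hix : ixOf (s ++ [r.getD j 0]) = s.length := by
            unfold ixOf; rw [hmax, PySem.List.index?_append_singleton_self s _ hnotin]; rfl
          simp only [bUpdate, Int.toNat_natCast]
          rw [if_pos hlt, hmax, hix]
        · have hmax : maxOf (s ++ [r.getD j 0]) = maxOf s := by
            rw [maxOf_append_singleton _ _ hs]; exact max_eq_left (not_lt.mp hlt)
          have hix : ixOf (s ++ [r.getD j 0]) = ixOf s := by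
            unfold ixOf; rw [hmax, PySem.List.index?_append_of_mem _ (maxOf_mem s hs)]
          simp only [bUpdate, Int.toNat_natCast]
          rw [if_neg hlt, hmax, hix]
      rw [hstep]
      have hlen : (s.length : Int) + 1 = (((s ++ [r.getD j 0]).length : Nat) : Int) := by
        simp [List.length_append]
      rw [hlen, ih (s ++ [r.getD j 0]) (by simp)]
      simp

theorem foldl_min_le (rest : List (List Int)) : ∀ (a : Nat),
    rest.foldl (fun m l => min m l.length) a ≤ a := by
  induction rest with
  | nil => intro a; simp
  | cons r rest ih =>
      intro a
      exact le_trans (ih (min a r.length)) (min_le_left _ _)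

theorem take_map_range (r0 : List Int) (n : Nat) (h : n ≤ r0.length) :
    (r0.take n).map (fun v => (v, (0 : Int)))
      = (List.range n).map (fun j => (r0.getD j 0, (0 : Int))) := by
  apply List.ext_getElem
  · simp [h]
  · intro i h1 h2
    simp at h1
    simp [List.getD_eq_getElem?_getD, List.getElem?_eq_getElem (lt_of_lt_of_le h1.1 h)]

-- ===== VERDICT (by name: the statement is the Claim_ definition above) =====
theorem compute_High_spec : Claim_equal_compute_High := by
  intro lst _
  unfold Spec_compute_High
  match lst with
  | [] => rfl
  | r0 :: rest =>
      have hn : rest.foldl (fun m l => min m l.length) r0.length ≤ r0.length :=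
        foldl_min_le rest r0.length
      have hscan : ∀ j : Nat,
          (PySem.List.enumerate rest (1 : Int)).foldl
              (fun b p => bUpdate p ((j : Int), b)) (r0.getD j 0, (0 : Int))
            = (maxOf ((r0 :: rest).map (fun row => row.getD j 0)),
               ((ixOf ((r0 :: rest).map (fun row => row.getD j 0)) : Nat) : Int)) := by
        intro j
        have h1 : maxOf [r0.getD j 0] = r0.getD j 0 := by simp [maxOf]
        have h2 : ((ixOf [r0.getD j 0] : Nat) : Int) = 0 := by
          simp [ixOf, maxOf]
        have h := scan_inv j rest [r0.getD j 0] (by simp)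
        simp only [List.length_cons, List.length_nil, Nat.cast_one, h1, h2,
          List.cons_append, List.nil_append, List.map_cons] at h ⊢
        exact h
      have hA : compute_High (r0 :: rest)
          = ((List.range (rest.foldl (fun m l => min m l.length) r0.length)).map
               (fun j => ((ixOf ((r0 :: rest).map (fun row => row.getD j 0)) : Nat) : Int)),
             (List.range (rest.foldl (fun m l => min m l.length) r0.length)).map
               (fun j => maxOf ((r0 :: rest).map (fun row => row.getD j 0)))) := by
        simp only [compute_High, pyZipStar]
        rw [foldA _ ([], []) (by intro c hc; rcases List.mem_map.mp hc with ⟨j, _, rfl⟩; simp)]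
        simp [List.map_map]
      have hB : compute_High_alt (r0 :: rest)
          = ((List.range (rest.foldl (fun m l => min m l.length) r0.length)).map
               (fun j => ((ixOf ((r0 :: rest).map (fun row => row.getD j 0)) : Nat) : Int)),
             (List.range (rest.foldl (fun m l => min m l.length) r0.length)).map
               (fun j => maxOf ((r0 :: rest).map (fun row => row.getD j 0)))) := by
        simp only [compute_High_alt]
        rw [take_map_range r0 _ hn, foldB_pointwise]
        simp only [List.map_map]
        congr 1 <;>
          · apply List.map_congr_left
            intro j hj
            simp only [Function.comp_apply]
            rw [hscan j]
      rw [hA, hB]
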